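-- pv_equiv track=rewrite | github.com/danielndahi/kiswahili-crossword | crossword.py | get_word_in_direction
-- ===== SOURCE A (Python) =====
-- GRID_SIZE = 15
--
-- EMPTY = '.'
--
-- def get_word_in_direction(grid, r, c, dr, dc):
--     """Get full word in the (dr, dc) direction that includes (r, c)."""
--     start_r, start_c = r, c
--     # Move backwards to start of word
--     while 0 <= start_r - dr < GRID_SIZE and 0 <= start_c - dc < GRID_SIZE and grid[start_r - dr][start_c - dc] != EMPTY:
--         start_r -= dr
--         start_c -= dc
--
--     letters = []
--     rr, cc = start_r, start_c
--     while 0 <= rr < GRID_SIZE and 0 <= cc < GRID_SIZE and grid[rr][cc] != EMPTY: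
--         letters.append(grid[rr][cc])
--         rr += dr
--         cc += dc
--     return "".join(letters)
-- ===== SOURCE B (Python) =====
-- GRID_SIZE = 15
--
-- EMPTY = '.'
--
-- def get_word_in_direction(grid, r, c, dr, dc):
--     """Get full word in the (dr, dc) direction that includes (r, c)."""
--     def ray(rr, cc, sr, sc):
--         cells = []
--         while 0 <= rr < GRID_SIZE and 0 <= cc < GRID_SIZE and grid[rr][cc] != EMPTY:
--             cells.append(grid[rr][cc])
--             rr += sr
--             cc += sc
--         return cells
--     backward = ray(r - dr, c - dc, -dr, -dc)
--     forward = ray(r, c, dr, dc)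
--     return "".join(reversed(backward)) + "".join(forward)
-- ===== Notes on version B (the rewrite author's own statement) =====
-- stated objective: alternative
-- what changed: B never locates the word start: a single ray helper scans outward from (r,c) in both directions (forward from (r,c), backward from (r-dr,c-dc)) and the result is reversed(backward)+forward, replacing A's two-phase walk-back-to-start-then-collect.
-- outside the precondition, e.g. on get_word_in_direction([['a']], 0, 0, -1, 6): A returns 'a', B returns 'a'; on get_word_in_direction([['.']], 0, 0, 0, 0): A returns '', B returns ''
import Mathlib
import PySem

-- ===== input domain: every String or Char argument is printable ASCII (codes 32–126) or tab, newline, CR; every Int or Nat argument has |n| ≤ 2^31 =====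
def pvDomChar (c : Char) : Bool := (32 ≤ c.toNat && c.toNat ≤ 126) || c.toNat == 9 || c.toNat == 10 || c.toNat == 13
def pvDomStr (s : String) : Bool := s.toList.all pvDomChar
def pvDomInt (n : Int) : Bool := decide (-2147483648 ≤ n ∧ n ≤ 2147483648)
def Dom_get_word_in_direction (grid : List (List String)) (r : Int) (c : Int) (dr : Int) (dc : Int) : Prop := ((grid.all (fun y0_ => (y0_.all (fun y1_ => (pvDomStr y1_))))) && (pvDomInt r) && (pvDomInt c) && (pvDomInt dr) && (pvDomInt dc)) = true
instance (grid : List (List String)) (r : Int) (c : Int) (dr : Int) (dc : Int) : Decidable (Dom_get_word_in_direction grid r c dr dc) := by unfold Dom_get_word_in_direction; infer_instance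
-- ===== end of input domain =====

-- B collects the word by scanning outward from (r,c) with one ray helper run in both directions,
-- instead of A's walk-back-to-the-start-then-collect; same cost, different decomposition (return value only).

-- shared cell access: grid[rr][cc]; both Pythons evaluate it only under 0 ≤ rr,cc < 15,
-- where it is exact on the 15×15 grids Pre_ admits (pyGet? = Python indexing; the getD defaults are never reached there)
def pvCell (grid : List (List String)) (rr cc : Int) : String :=
  (PySem.List.pyGet? ((PySem.List.pyGet? grid rr).getD []) cc).getD ""

-- the loop guard `0 <= rr < 15 and 0 <= cc < 15 and grid[rr][cc] != '.'` (same guard in A and B)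
def pvOk (grid : List (List String)) (rr cc : Int) : Bool :=
  decide (0 ≤ rr) && decide (rr < 15) && decide (0 ≤ cc) && decide (cc < 15) && (pvCell grid rr cc != ".")

-- ===== PORT A =====
-- A's first while-loop: move (start_r, start_c) backwards to the start of the word.
-- Fuel 16 is enough: while the loop runs the checked cell stays inside [0,15)² and moves by
-- (dr,dc) ≠ (0,0) each step, so it runs at most 15 times (Pre_ excludes (0,0), where Python diverges).
def pvBackA (grid : List (List String)) (dr dc sr sc : Int) : Nat → Int × Int
  | 0 => (sr, sc)
  | f + 1 =>
    if pvOk grid (sr - dr) (sc - dc) then pvBackA grid dr dc (sr - dr) (sc - dc) f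
    else (sr, sc)

-- A's second while-loop: letters.append(grid[rr][cc]); rr += dr; cc += dc   (fuel 16, same bound)
def pvCollectA (grid : List (List String)) (dr dc rr cc : Int) : Nat → List String
  | 0 => []
  | f + 1 =>
    if pvOk grid rr cc then pvCell grid rr cc :: pvCollectA grid dr dc (rr + dr) (cc + dc) f
    else []

def get_word_in_direction (grid : List (List String)) (r : Int) (c : Int) (dr : Int) (dc : Int) : String :=
  let s := pvBackA grid dr dc r c 16
  PySem.Str.join "" (pvCollectA grid dr dc s.1 s.2 16)

-- ===== PORT B =====
-- B's ray helper: collect cells from (rr,cc) stepping by (sr,sc) while in bounds and non-empty (fuel 16, same bound as A's loops)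
def pvRayB (grid : List (List String)) (sr sc rr cc : Int) : Nat → List String
  | 0 => []
  | f + 1 =>
    if pvOk grid rr cc then pvCell grid rr cc :: pvRayB grid sr sc (rr + sr) (cc + sc) f
    else []

def get_word_in_direction_alt (grid : List (List String)) (r : Int) (c : Int) (dr : Int) (dc : Int) : String :=
  let backward := pvRayB grid (-dr) (-dc) (r - dr) (c - dc) 16
  let forward := pvRayB grid dr dc r c 16
  PySem.Str.join "" backward.reverse ++ PySem.Str.join "" forward

-- ===== PRECONDITION & SPEC =====
-- A indexes the grid under the module's GRID_SIZE = 15 bounds, so Pre_ admits (a) the full 15x15 board, where every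
-- access exists, or (b) inputs whose two loop guards both fail their bounds test at once, so no cell is ever read and
-- A returns ''; a nonzero direction is required throughout. Excluded: partial grids whose scan reads a missing cell
-- (IndexError), (dr,dc) = (0,0) on a non-empty in-bounds cell (A loops forever), and the few returning corners cited
-- in claim.json (a scan on a partial grid that happens to escape the board before reading a missing cell).
def Pre_get_word_in_direction (grid : List (List String)) (r : Int) (c : Int) (dr : Int) (dc : Int) : Prop :=
  ¬(dr = 0 ∧ dc = 0) ∧
  ((grid.length = 15 ∧ ∀ row ∈ grid, row.length = 15) ∨
   (¬(0 ≤ r - dr ∧ r - dr < 15 ∧ 0 ≤ c - dc ∧ c - dc < 15) ∧ ¬(0 ≤ r ∧ r < 15 ∧ 0 ≤ c ∧ c < 15)))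

instance (grid : List (List String)) (r : Int) (c : Int) (dr : Int) (dc : Int) : Decidable (Pre_get_word_in_direction grid r c dr dc) := by
  unfold Pre_get_word_in_direction; infer_instance

def pvWitness_get_word_in_direction : List (List String) × Int × Int × Int × Int :=
  (List.replicate 15 (List.replicate 15 "a"), 3, 4, 0, 1)

def Spec_get_word_in_direction (grid : List (List String)) (r : Int) (c : Int) (dr : Int) (dc : Int) (out : String) : Prop := out = get_word_in_direction_alt grid r c dr dc
instance (grid : List (List String)) (r : Int) (c : Int) (dr : Int) (dc : Int) (out : String) : Decidable (Spec_get_word_in_direction grid r c dr dc out) := by unfold Spec_get_word_in_direction; infer_instance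

-- ===== CLAIM (what is proved, stated in full; the proofs are below) =====
def Claim_equal_get_word_in_direction : Prop := ∀ (grid : List (List String)) (r : Int) (c : Int) (dr : Int) (dc : Int), Dom_get_word_in_direction grid r c dr dc → Pre_get_word_in_direction grid r c dr dc → Spec_get_word_in_direction grid r c dr dc (get_word_in_direction grid r c dr dc)

-- ===== LEMMAS AND PROOFS =====

theorem pvWitness_ok :
    Dom_get_word_in_direction (pvWitness_get_word_in_direction.1) (pvWitness_get_word_in_direction.2.1) (pvWitness_get_word_in_direction.2.2.1) (pvWitness_get_word_in_direction.2.2.2.1) (pvWitness_get_word_in_direction.2.2.2.2) ∧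
    Pre_get_word_in_direction (pvWitness_get_word_in_direction.1) (pvWitness_get_word_in_direction.2.1) (pvWitness_get_word_in_direction.2.2.1) (pvWitness_get_word_in_direction.2.2.2.1) (pvWitness_get_word_in_direction.2.2.2.2) := by
  constructor <;> decide

-- "".join lemmas, via toList (Chars.join [] = flatten of intersperse [])
theorem pvFlattenIntersperseNil {α : Type} (xs : List (List α)) :
    (List.intersperse [] xs).flatten = xs.flatten := by
  induction xs with
  | nil => simp
  | cons a t ih =>
    cases t with
    | nil => simp
    | cons b u => simp only [List.intersperse, List.flatten_cons] at *; simp [ih]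

theorem pvJoinNil : PySem.Str.join "" ([] : List String) = "" := by
  apply String.toList_inj.mp
  simp [PySem.Str.toList_join, PySem.Chars.join, List.intercalate]

theorem pvJoinCons (s : String) (l : List String) :
    PySem.Str.join "" (s :: l) = s ++ PySem.Str.join "" l := by
  apply String.toList_inj.mp
  simp [PySem.Str.toList_join, PySem.Chars.join, List.intercalate, pvFlattenIntersperseNil]

theorem pvJoinAppend (l1 l2 : List String) :
    PySem.Str.join "" (l1 ++ l2) = PySem.Str.join "" l1 ++ PySem.Str.join "" l2 := by
  apply String.toList_inj.mp
  simp [PySem.Str.toList_join, PySem.Chars.join, List.intercalate, pvFlattenIntersperseNil]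

-- the loop measure: the moving coordinate's remaining room inside [0,15)
def pvMu (dr dc rr cc : Int) : Nat :=
  if 0 < dr then (15 - rr).toNat
  else if dr < 0 then (rr + 1).toNat
  else if 0 < dc then (15 - cc).toNat
  else (cc + 1).toNat

theorem pvOk_bounds {grid : List (List String)} {rr cc : Int} (h : pvOk grid rr cc = true) :
    0 ≤ rr ∧ rr < 15 ∧ 0 ≤ cc ∧ cc < 15 := by
  simp only [pvOk, Bool.and_eq_true, decide_eq_true_eq] at h
  exact ⟨h.1.1.1.1, h.1.1.1.2, h.1.1.2, h.1.2⟩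

theorem pvMu_pos {dr dc rr cc : Int} (h : 0 ≤ rr ∧ rr < 15 ∧ 0 ≤ cc ∧ cc < 15) :
    1 ≤ pvMu dr dc rr cc := by
  unfold pvMu; split_ifs <;> omega

theorem pvMu_le {dr dc rr cc : Int} (h : 0 ≤ rr ∧ rr < 15 ∧ 0 ≤ cc ∧ cc < 15) :
    pvMu dr dc rr cc ≤ 15 := by
  unfold pvMu; split_ifs <;> omega

theorem pvMu_step {dr dc rr cc : Int} (hd : ¬(dr = 0 ∧ dc = 0))
    (h : 0 ≤ rr ∧ rr < 15 ∧ 0 ≤ cc ∧ cc < 15) :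
    pvMu dr dc (rr + dr) (cc + dc) < pvMu dr dc rr cc := by
  unfold pvMu; split_ifs <;> omega

-- fuel stability of the collecting loop
theorem pvCollectA_stable (grid : List (List String)) (dr dc : Int) (hd : ¬(dr = 0 ∧ dc = 0)) :
    ∀ (f1 : Nat) (rr cc : Int) (f2 : Nat),
      (pvOk grid rr cc = true → pvMu dr dc rr cc ≤ f1 ∧ pvMu dr dc rr cc ≤ f2) →
      pvCollectA grid dr dc rr cc f1 = pvCollectA grid dr dc rr cc f2 := by
  intro f1
  induction f1 with
  | zero =>
    intro rr cc f2 hmu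
    cases hok : pvOk grid rr cc with
    | true =>
      have h1 := pvMu_pos (dr := dr) (dc := dc) (pvOk_bounds hok)
      obtain ⟨h0, -⟩ := hmu hok
      omega
    | false =>
      cases f2 with
      | zero => rfl
      | succ g => simp [pvCollectA, hok]
  | succ f ih =>
    intro rr cc f2 hmu
    cases hok : pvOk grid rr cc with
    | false =>
      cases f2 with
      | zero => simp [pvCollectA, hok]
      | succ g => simp [pvCollectA, hok]
    | true =>
      have hb := pvOk_bounds hok
      have h1 := pvMu_pos (dr := dr) (dc := dc) hb
      obtain ⟨hf1, hf2⟩ := hmu hok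
      cases f2 with
      | zero => omega
      | succ g =>
        simp only [pvCollectA, hok, if_true]
        congr 1
        apply ih
        intro _
        have := pvMu_step hd hb
        omega

theorem pvCollectA_stable15 (grid : List (List String)) (dr dc : Int) (hd : ¬(dr = 0 ∧ dc = 0))
    (rr cc : Int) (f1 f2 : Nat) (h1 : 15 ≤ f1) (h2 : 15 ≤ f2) :
    pvCollectA grid dr dc rr cc f1 = pvCollectA grid dr dc rr cc f2 := by
  apply pvCollectA_stable grid dr dc hd
  intro hok
  have := pvMu_le (dr := dr) (dc := dc) (pvOk_bounds hok)
  omega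

-- B's ray is (definitionally the same loop as) A's collector
theorem pvRayB_eq_collectA (grid : List (List String)) (sr sc : Int) :
    ∀ (f : Nat) (rr cc : Int), pvRayB grid sr sc rr cc f = pvCollectA grid sr sc rr cc f := by
  intro f
  induction f with
  | zero => intro rr cc; rfl
  | succ g ih => intro rr cc; simp [pvRayB, pvCollectA, ih]

-- main invariant: walking back f steps and then collecting equals
-- (reversed backward ray of fuel f) ++ (forward collection from (r,c))
theorem pvMain (grid : List (List String)) (dr dc : Int) (hd : ¬(dr = 0 ∧ dc = 0)) :
    ∀ (f : Nat) (r c : Int) (f1 f2 : Nat), 15 ≤ f1 → 15 ≤ f2 →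
      PySem.Str.join "" (pvCollectA grid dr dc (pvBackA grid dr dc r c f).1 (pvBackA grid dr dc r c f).2 f1)
      = PySem.Str.join "" (pvCollectA grid (-dr) (-dc) (r - dr) (c - dc) f).reverse
        ++ PySem.Str.join "" (pvCollectA grid dr dc r c f2) := by
  intro f
  induction f with
  | zero =>
    intro r c f1 f2 h1 h2
    simp only [pvBackA, pvCollectA, List.reverse_nil, pvJoinNil, String.empty_append]
    exact congrArg _ (pvCollectA_stable15 grid dr dc hd r c f1 f2 h1 h2)
  | succ f ih =>
    intro r c f1 f2 h1 h2
    cases hok : pvOk grid (r - dr) (c - dc) with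
    | false =>
      simp only [pvBackA, pvCollectA, hok, if_false, Bool.false_eq_true,
        List.reverse_nil, pvJoinNil, String.empty_append]
      exact congrArg _ (pvCollectA_stable15 grid dr dc hd r c f1 f2 h1 h2)
    | true =>
      have hstep : pvBackA grid dr dc r c (f + 1) = pvBackA grid dr dc (r - dr) (c - dc) f := by
        simp [pvBackA, hok]
      rw [hstep, ih (r - dr) (c - dc) f1 16 h1 (by norm_num)]
      have hcoll : pvCollectA grid dr dc (r - dr) (c - dc) 16
          = pvCell grid (r - dr) (c - dc) :: pvCollectA grid dr dc r c 15 := by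
        show (if pvOk grid (r - dr) (c - dc) then _ else []) = _
        rw [hok]
        simp only [if_true]
        have e1 : r - dr + dr = r := by ring
        have e2 : c - dc + dc = c := by ring
        rw [e1, e2]
      have hray : pvCollectA grid (-dr) (-dc) (r - dr) (c - dc) (f + 1)
          = pvCell grid (r - dr) (c - dc) :: pvCollectA grid (-dr) (-dc) (r - dr - dr) (c - dc - dc) f := by
        show (if pvOk grid (r - dr) (c - dc) then _ else []) = _
        rw [hok]
        simp only [if_true]
        have e1 : r - dr + -dr = r - dr - dr := by ring
        have e2 : c - dc + -dc = c - dc - dc := by ring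
        rw [e1, e2]
      rw [hcoll, hray, pvJoinCons, List.reverse_cons, pvJoinAppend,
        pvCollectA_stable15 grid dr dc hd r c 15 f2 (by norm_num) h2, pvJoinCons, pvJoinNil]
      rw [String.append_assoc]
      congr 2
      apply String.toList_inj.mp
      simp

-- ===== VERDICT (by name: the statement is the Claim_ definition above) =====
theorem get_word_in_direction_spec : Claim_equal_get_word_in_direction := by
  intro grid r c dr dc _hdom hpre
  have hd := hpre.1
  show get_word_in_direction grid r c dr dc = get_word_in_direction_alt grid r c dr dc
  unfold get_word_in_direction get_word_in_direction_alt
  simp only [pvRayB_eq_collectA]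
  exact pvMain grid dr dc hd 16 r c 16 16 (by norm_num) (by norm_num)
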